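-- pv_equiv track=rewrite | github.com/strateg/home-lab | topology-tools/plugins/assemblers/workspace_assembler.py | _derive_dirty_scopes
-- ===== SOURCE A (Python) =====
-- def _derive_dirty_scopes(
--     previous: dict[str, dict[str, str]] | None,
--     current: dict[str, dict[str, str]],
-- ) -> tuple[list[str], int]:
--     changed_paths: list[str] = []
--     all_paths = sorted(set(current.keys()) | set((previous or {}).keys()))
--     for rel_path in all_paths:
--         old = (previous or {}).get(rel_path)
--         new = current.get(rel_path)
--         if old != new:
--             changed_paths.append(rel_path)
--
--     scopes: set[str] = set()
--     if previous is None and current: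
--         scopes.add("all")
--     for rel_path in changed_paths:
--         scopes.add("generated")
--         head = rel_path.split("/", 1)[0]
--         scopes.add(head if head else "root")
--         old = (previous or {}).get(rel_path, {})
--         new = current.get(rel_path, {})
--         for row in (old, new):
--             plugin_id = row.get("producer_plugin")
--             if isinstance(plugin_id, str) and plugin_id:
--                 scopes.add(f"plugin:{plugin_id}")
--     return sorted(scopes), len(changed_paths)
-- ===== SOURCE B (Python) =====
-- def _derive_dirty_scopes(
--     previous: dict[str, dict[str, str]] | None,
--     current: dict[str, dict[str, str]],
-- ) -> tuple[list[str], int]: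
--     # Merge-scan: walk the two key-sorted item lists with two pointers instead of
--     # building a key-set union and doing per-key dict lookups.
--     a = sorted((previous or {}).items(), key=lambda kv: kv[0])
--     b = sorted(current.items(), key=lambda kv: kv[0])
--     scopes: set[str] = set()
--     if previous is None and current:
--         scopes.add("all")
--     changed = 0
--     i = j = 0
--     while i < len(a) or j < len(b):
--         if j >= len(b) or (i < len(a) and a[i][0] < b[j][0]):
--             key, old, new = a[i][0], a[i][1], None
--             i += 1
--         elif i >= len(a) or b[j][0] < a[i][0]:
--             key, old, new = b[j][0], None, b[j][1]
--             j += 1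
--         else:
--             key, old, new = a[i][0], a[i][1], b[j][1]
--             i += 1
--             j += 1
--         if old != new:
--             changed += 1
--             scopes.add("generated")
--             head = key.split("/", 1)[0]
--             scopes.add(head if head else "root")
--             for row in (old, new):
--                 if row is not None:
--                     plugin_id = row.get("producer_plugin")
--                     if isinstance(plugin_id, str) and plugin_id:
--                         scopes.add("plugin:" + plugin_id)
--     return sorted(scopes), changed
-- ===== Notes on version B (the rewrite author's own statement) =====
-- stated objective: alternative
-- what changed: B replaces A's key-set union plus per-key dict lookups with a two-pointer merge over the two key-sorted item lists, pairing each path's old/new rows during the merge and accumulating the scope set and change counter in that single scan; Pre_ excludes association lists with duplicate keys, which cannot arise from Python dicts (their keys are unique).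
import Mathlib
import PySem

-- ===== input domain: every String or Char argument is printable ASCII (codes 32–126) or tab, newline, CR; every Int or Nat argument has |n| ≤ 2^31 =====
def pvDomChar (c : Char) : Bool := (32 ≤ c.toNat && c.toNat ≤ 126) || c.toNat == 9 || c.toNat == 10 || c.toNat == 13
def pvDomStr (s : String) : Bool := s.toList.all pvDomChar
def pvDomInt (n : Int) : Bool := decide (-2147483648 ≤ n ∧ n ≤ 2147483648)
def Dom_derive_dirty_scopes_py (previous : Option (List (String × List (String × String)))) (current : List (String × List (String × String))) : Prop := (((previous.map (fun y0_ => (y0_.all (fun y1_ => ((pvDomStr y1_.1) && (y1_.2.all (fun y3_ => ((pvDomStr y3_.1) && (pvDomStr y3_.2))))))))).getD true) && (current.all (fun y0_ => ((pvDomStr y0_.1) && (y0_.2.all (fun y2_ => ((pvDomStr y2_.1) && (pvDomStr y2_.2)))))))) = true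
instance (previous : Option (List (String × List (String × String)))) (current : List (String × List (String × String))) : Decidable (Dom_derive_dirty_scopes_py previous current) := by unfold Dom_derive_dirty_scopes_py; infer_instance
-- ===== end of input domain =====

-- B replaces A's key-set union + per-key dict lookups by a two-pointer merge of the two
-- key-sorted item lists, deriving counter and scopes during the merge (objective: alternative).

-- ===== shared primitive helpers (Python semantics used identically by both sources) =====
-- Python dict == on str→str dicts: equal key sets and equal value at every key (order-insensitive);
-- dicts are the task's association lists with first-match lookup (List.lookup).
def pvRowEq (r1 r2 : List (String × String)) : Bool :=
  PySem.Set.equal (PySem.Set.ofList (r1.map (·.1))) (PySem.Set.ofList (r2.map (·.1))) &&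
  (r1.map (·.1)).all (fun k => List.lookup k r1 == List.lookup k r2)

-- Python (old != new) negated, where old/new are dict-or-None
def pvOptRowEq : Option (List (String × String)) → Option (List (String × String)) → Bool
  | none, none => true
  | some a, some b => pvRowEq a b
  | _, _ => false

-- rel_path.split("/", 1)[0]: split with a non-empty separator is always `some (h :: _)`,
-- so the fallback "" is unreachable — exact
def pvHead (rel : String) : String :=
  match PySem.Str.splitMax? rel "/" 1 with
  | some (h :: _) => h
  | _ => ""

-- row.get("producer_plugin"); add "plugin:<id>" when it is a non-empty string
def pvAddPlugin (s : PySem.Set String) (row : List (String × String)) : PySem.Set String :=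
  match List.lookup "producer_plugin" row with
  | some p => if p ≠ "" then PySem.Set.add s ("plugin:" ++ p) else s
  | none => s

-- ===== PORT A =====
def derive_dirty_scopes_py (previous : Option (List (String × List (String × String)))) (current : List (String × List (String × String))) : List String × Int :=
  let prev := previous.getD []
  let all_paths := PySem.List.sorted
      (PySem.Set.union (PySem.Set.ofList (current.map (·.1))) (prev.map (·.1))) (fun x => x) false
  let changed_paths := all_paths.foldl (fun acc rel =>
      if !(pvOptRowEq (List.lookup rel prev) (List.lookup rel current)) then acc ++ [rel] else acc)
      ([] : List String)
  let scopes0 : PySem.Set String :=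
      if previous.isNone && !current.isEmpty then PySem.Set.add PySem.Set.empty "all" else PySem.Set.empty
  let scopes := changed_paths.foldl (fun s rel =>
      let s := PySem.Set.add s "generated"
      let head := pvHead rel
      let s := PySem.Set.add s (if head ≠ "" then head else "root")
      let s := pvAddPlugin s ((List.lookup rel prev).getD [])
      pvAddPlugin s ((List.lookup rel current).getD [])) scopes0
  (PySem.List.sorted scopes (fun x => x) false, PySem.List.len changed_paths)

-- ===== PORT B =====
-- the body of B's while loop: one (key, old, new) triple updates (scopes, changed)
def pvBody (st : PySem.Set String × Int) (key : String)
    (old new : Option (List (String × String))) : PySem.Set String × Int :=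
  if pvOptRowEq old new then st
  else
    let s := PySem.Set.add st.1 "generated"
    let head := pvHead key
    let s := PySem.Set.add s (if head ≠ "" then head else "root")
    let s := match old with | some row => pvAddPlugin s row | none => s
    let s := match new with | some row => pvAddPlugin s row | none => s
    (s, st.2 + 1)

-- B's two-pointer while loop over the two key-sorted item lists (Python string '<' is Lean's '<')
def pvMerge : List (String × List (String × String)) → List (String × List (String × String)) →
    PySem.Set String × Int → PySem.Set String × Int
  | [], [], st => st
  | (k, v) :: as, [], st => pvMerge as [] (pvBody st k (some v) none)
  | [], (k, w) :: bs, st => pvMerge [] bs (pvBody st k none (some w))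
  | (k, v) :: as, (k', w) :: bs, st =>
    if k < k' then pvMerge as ((k', w) :: bs) (pvBody st k (some v) none)
    else if k' < k then pvMerge ((k, v) :: as) bs (pvBody st k' none (some w))
    else pvMerge as bs (pvBody st k (some v) (some w))
termination_by a b _ => a.length + b.length

def derive_dirty_scopes_py_alt (previous : Option (List (String × List (String × String)))) (current : List (String × List (String × String))) : List String × Int :=
  let a := PySem.List.sorted (previous.getD []) (fun kv => kv.1) false
  let b := PySem.List.sorted current (fun kv => kv.1) false
  let scopes0 : PySem.Set String :=
      if previous.isNone && !current.isEmpty then PySem.Set.add PySem.Set.empty "all" else PySem.Set.empty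
  let res := pvMerge a b (scopes0, 0)
  (PySem.List.sorted res.1 (fun x => x) false, res.2)

-- ===== PRECONDITION & SPEC =====
-- Pre_ excludes association lists with duplicate keys: a Python dict's keys are unique, so no
-- actual Python input reaches them, and on such lists first-match vs merge pairing is accidental.
def Pre_derive_dirty_scopes_py (previous : Option (List (String × List (String × String)))) (current : List (String × List (String × String))) : Prop :=
  ((previous.getD []).map Prod.fst).Nodup ∧ (current.map Prod.fst).Nodup
instance (previous : Option (List (String × List (String × String)))) (current : List (String × List (String × String))) : Decidable (Pre_derive_dirty_scopes_py previous current) := by unfold Pre_derive_dirty_scopes_py; infer_instance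

def pvWitness_derive_dirty_scopes_py : (Option (List (String × List (String × String)))) × (List (String × List (String × String))) :=
  (some [("a", [("producer_plugin", "p1")])], [("a", []), ("b/c", [])])

def Spec_derive_dirty_scopes_py (previous : Option (List (String × List (String × String)))) (current : List (String × List (String × String))) (out : List String × Int) : Prop := out = derive_dirty_scopes_py_alt previous current
instance (previous : Option (List (String × List (String × String)))) (current : List (String × List (String × String))) (out : List String × Int) : Decidable (Spec_derive_dirty_scopes_py previous current out) := by unfold Spec_derive_dirty_scopes_py; infer_instance

-- ===== CLAIM (what is proved, stated in full; the proofs are below) =====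
def Claim_equal_derive_dirty_scopes_py : Prop := ∀ (previous : Option (List (String × List (String × String)))) (current : List (String × List (String × String))), Dom_derive_dirty_scopes_py previous current → Pre_derive_dirty_scopes_py previous current → Spec_derive_dirty_scopes_py previous current (derive_dirty_scopes_py previous current)

-- ===== LEMMAS AND PROOFS =====

-- the plugin scopes a row contributes, as a list
def pvPluginList (row : List (String × String)) : List String :=
  match List.lookup "producer_plugin" row with
  | some p => if p ≠ "" then ["plugin:" ++ p] else []
  | none => []

def pvPluginListO : Option (List (String × String)) → List String
  | some row => pvPluginList row
  | none => []

-- all scopes one changed path contributes (A's loop, keyed by path)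
def pvScopeList (prev cur : List (String × List (String × String))) (rel : String) : List String :=
  "generated" :: (if pvHead rel ≠ "" then pvHead rel else "root") ::
    (pvPluginList ((List.lookup rel prev).getD []) ++ pvPluginList ((List.lookup rel cur).getD []))

-- all scopes one changed merge triple contributes (B's loop, keyed by triple)
def pvTScopes (t : String × Option (List (String × String)) × Option (List (String × String))) : List String :=
  "generated" :: (if pvHead t.1 ≠ "" then pvHead t.1 else "root") ::
    (pvPluginListO t.2.1 ++ pvPluginListO t.2.2)

def pvTChanged (t : String × Option (List (String × String)) × Option (List (String × String))) : Bool :=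
  !(pvOptRowEq t.2.1 t.2.2)

-- the per-changed-path scope-set step A's second loop performs
def pvStep (prev cur : List (String × List (String × String))) (s : PySem.Set String) (rel : String) : PySem.Set String :=
  pvAddPlugin (pvAddPlugin
    (PySem.Set.add (PySem.Set.add s "generated") (if pvHead rel ≠ "" then pvHead rel else "root"))
    ((List.lookup rel prev).getD [])) ((List.lookup rel cur).getD [])

theorem pvAddPlugin_eq_update (s : PySem.Set String) (row : List (String × String)) :
    pvAddPlugin s row = PySem.Set.update s (pvPluginList row) := by
  unfold pvAddPlugin pvPluginList
  cases List.lookup "producer_plugin" row with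
  | none => rfl
  | some p =>
      by_cases hp : p = "" <;> simp [hp, PySem.Set.update]

theorem pvStep_eq_update (prev cur : List (String × List (String × String))) (s : PySem.Set String) (rel : String) :
    pvStep prev cur s rel = PySem.Set.update s (pvScopeList prev cur rel) := by
  unfold pvStep pvScopeList
  simp [pvAddPlugin_eq_update, PySem.Set.update]

-- folding A's step over a list of changed paths is one Set.update
theorem foldl_pvStep (prev cur : List (String × List (String × String))) :
    ∀ (l : List String) (s0 : PySem.Set String),
      l.foldl (pvStep prev cur) s0 = PySem.Set.update s0 (l.flatMap (pvScopeList prev cur)) := by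
  intro l
  induction l with
  | nil => intro s0; rfl
  | cons x t ih =>
      intro s0
      rw [List.foldl_cons, ih, List.flatMap_cons, PySem.Set.update_append]
      congr 1
      exact pvStep_eq_update prev cur s0 x

-- A's second loop body is exactly that step
theorem foldl_scopes_A (prev cur : List (String × List (String × String))) :
    ∀ (l : List String) (s0 : PySem.Set String),
      l.foldl (fun s rel =>
          let s := PySem.Set.add s "generated"
          let head := pvHead rel
          let s := PySem.Set.add s (if head ≠ "" then head else "root")
          let s := pvAddPlugin s ((List.lookup rel prev).getD [])
          pvAddPlugin s ((List.lookup rel cur).getD [])) s0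
      = PySem.Set.update s0 (l.flatMap (pvScopeList prev cur)) := by
  exact foldl_pvStep prev cur

-- B's body on a changed triple is one Set.update plus a count
theorem pvBody_changed (s : PySem.Set String) (c : Int) (k : String)
    (old new : Option (List (String × String))) (h : pvOptRowEq old new = false) :
    pvBody (s, c) k old new = (PySem.Set.update s (pvTScopes (k, old, new)), c + 1) := by
  unfold pvBody pvTScopes
  rw [h]
  cases old <;> cases new <;>
    simp [pvAddPlugin_eq_update, pvPluginListO, PySem.Set.update]

-- B's fold of the body over a triple list: scopes from the changed triples, count of them
theorem foldl_pvBody (l : List (String × Option (List (String × String)) × Option (List (String × String))))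
    (s0 : PySem.Set String) (c : Int) :
    l.foldl (fun st t => pvBody st t.1 t.2.1 t.2.2) (s0, c)
      = (PySem.Set.update s0 ((l.filter pvTChanged).flatMap pvTScopes),
         c + (((l.filter pvTChanged).length : Int))) := by
  induction l generalizing s0 c with
  | nil => simp
  | cons t r ih =>
    obtain ⟨k, old, new⟩ := t
    by_cases h : pvOptRowEq old new = true
    · have hch : pvTChanged (k, old, new) = false := by simp [pvTChanged, h]
      have hb : pvBody (s0, c) k old new = (s0, c) := by simp [pvBody, h]
      simp only [List.foldl_cons, List.filter_cons, hch]
      rw [hb, ih]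
      simp
    · have h' : pvOptRowEq old new = false := Bool.eq_false_iff.mpr h
      have hch : pvTChanged (k, old, new) = true := by simp [pvTChanged, h']
      simp only [List.foldl_cons, List.filter_cons, hch, if_pos]
      rw [pvBody_changed _ _ _ _ _ h', ih]
      simp only [List.flatMap_cons, PySem.Set.update_append, List.length_cons, Prod.mk.injEq]
      exact ⟨trivial, by push_cast; ring⟩

-- basic association-list facts
theorem lookup_cons_self {β : Type} (k : String) (v : β) (l : List (String × β)) :
    List.lookup k ((k, v) :: l) = some v := by
  rw [List.lookup_cons]
  have : (k == k) = true := by simp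
  rw [this]

theorem lookup_cons_ne {β : Type} (k a : String) (v : β) (l : List (String × β)) (h : k ≠ a) :
    List.lookup k ((a, v) :: l) = List.lookup k l := by
  rw [List.lookup_cons]
  have : (k == a) = false := by simp [h]
  rw [this]

theorem lookup_eq_none_of_not_mem {β : Type} (k : String) (l : List (String × β))
    (h : k ∉ l.map Prod.fst) : List.lookup k l = none := by
  induction l with
  | nil => rfl
  | cons x t ih =>
    simp only [List.map_cons, List.mem_cons, not_or] at h
    rw [List.lookup_cons]
    have : (k == x.1) = false := by simp [h.1]
    rw [this]
    exact ih h.2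

theorem mem_of_lookup_eq_some {β : Type} (k : String) (v : β) (l : List (String × β))
    (h : List.lookup k l = some v) : (k, v) ∈ l := by
  induction l with
  | nil => simp [List.lookup] at h
  | cons x t ih =>
    rw [List.lookup_cons] at h
    by_cases hk : k = x.1
    · have hkx : (k == x.1) = true := by simp [hk]
      rw [hkx] at h
      simp at h
      cases x
      simp_all
    · have hkx : (k == x.1) = false := by simp [hk]
      rw [hkx] at h
      exact List.mem_cons_of_mem _ (ih h)

theorem lookup_eq_some_of_mem_nodup {β : Type} (k : String) (v : β) :
    ∀ (l : List (String × β)), (k, v) ∈ l → (l.map Prod.fst).Nodup → List.lookup k l = some v := by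
  intro l
  induction l with
  | nil => intro hm _; simp at hm
  | cons x t ih =>
    intro hm hnd
    simp only [List.map_cons, List.nodup_cons] at hnd
    rcases List.mem_cons.mp hm with he | hm'
    · rw [show x = (k, v) from he.symm]
      exact lookup_cons_self k v t
    · have hk : k ≠ x.1 := by
        rintro rfl
        exact hnd.1 (List.mem_map.mpr ⟨(x.1, v), hm', rfl⟩)
      obtain ⟨a, b⟩ := x
      rw [lookup_cons_ne k a b t hk]
      exact ih hm' hnd.2

theorem lookup_of_perm {β : Type} (k : String) (l1 l2 : List (String × β))
    (hp : l1.Perm l2) (hnd : (l1.map Prod.fst).Nodup) :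
    List.lookup k l1 = List.lookup k l2 := by
  cases h1 : List.lookup k l1 with
  | none =>
    have hk : k ∉ l1.map Prod.fst := by
      intro hm
      obtain ⟨p, hpm, hpe⟩ := List.mem_map.mp hm
      obtain ⟨a, b⟩ := p
      have ha : a = k := hpe
      subst ha
      have := lookup_eq_some_of_mem_nodup a b l1 hpm hnd
      rw [h1] at this
      simp at this
    have : k ∉ l2.map Prod.fst := fun hm => hk (((hp.map Prod.fst).mem_iff).mpr hm)
    exact (lookup_eq_none_of_not_mem k l2 this).symm
  | some v =>
    have hm2 : (k, v) ∈ l2 := hp.subset (mem_of_lookup_eq_some k v l1 h1)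
    have hnd2 : (l2.map Prod.fst).Nodup := ((hp.map Prod.fst).nodup_iff).mp hnd
    exact (lookup_eq_some_of_mem_nodup k v l2 hm2 hnd2).symm

-- the merge's triple trace
def pvTrips : List (String × List (String × String)) → List (String × List (String × String)) →
    List (String × Option (List (String × String)) × Option (List (String × String)))
  | [], [] => []
  | (k, v) :: as, [] => (k, some v, none) :: pvTrips as []
  | [], (k, w) :: bs => (k, none, some w) :: pvTrips [] bs
  | (k, v) :: as, (k', w) :: bs =>
    if k < k' then (k, some v, none) :: pvTrips as ((k', w) :: bs)
    else if k' < k then (k', none, some w) :: pvTrips ((k, v) :: as) bs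
    else (k, some v, some w) :: pvTrips as bs
termination_by a b => a.length + b.length

theorem pvMerge_eq_foldl (a b : List (String × List (String × String))) :
    ∀ st, pvMerge a b st = (pvTrips a b).foldl (fun st t => pvBody st t.1 t.2.1 t.2.2) st := by
  induction a, b using pvTrips.induct with
  | case1 => intro st; rw [pvMerge, pvTrips]; rfl
  | case2 k v as ih => intro st; rw [pvMerge, pvTrips, List.foldl_cons]; exact ih _
  | case3 k w bs ih => intro st; rw [pvMerge, pvTrips, List.foldl_cons]; exact ih _
  | case4 k1 v as k2 w bs h ih =>
    intro st; rw [pvMerge, pvTrips, if_pos h, if_pos h, List.foldl_cons]; exact ih _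
  | case5 k1 v as k2 w bs h1 h2 ih =>
    intro st; rw [pvMerge, pvTrips, if_neg h1, if_neg h1, if_pos h2, if_pos h2, List.foldl_cons]
    exact ih _
  | case6 k1 v as k2 w bs h1 h2 ih =>
    intro st; rw [pvMerge, pvTrips, if_neg h1, if_neg h1, if_neg h2, if_neg h2, List.foldl_cons]
    exact ih _

theorem mem_keys_pvTrips (a b : List (String × List (String × String))) (k : String) :
    k ∈ (pvTrips a b).map (·.1) ↔ k ∈ a.map Prod.fst ∨ k ∈ b.map Prod.fst := by
  induction a, b using pvTrips.induct with
  | case1 => simp [pvTrips]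
  | case2 k' v as ih => simp [pvTrips] at ih ⊢; rw [ih]
  | case3 k' w bs ih => simp [pvTrips] at ih ⊢; rw [ih]
  | case4 k1 v as k2 w bs h ih =>
    rw [pvTrips, if_pos h]; simp at ih ⊢; rw [ih]; tauto
  | case5 k1 v as k2 w bs h1 h2 ih =>
    rw [pvTrips, if_neg h1, if_pos h2]; simp at ih ⊢; rw [ih]; tauto
  | case6 k1 v as k2 w bs h1 h2 ih =>
    have hk : k1 = k2 := le_antisymm (not_lt.mp h2) (not_lt.mp h1)
    rw [pvTrips, if_neg h1, if_neg h2]; subst hk; simp at ih ⊢; rw [ih]; tauto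

-- every key produced by the merge comes from one of the two inputs
theorem lt_keys_pvTrips (a b : List (String × List (String × String))) (c : String)
    (hc1 : ∀ p ∈ a, c < p.1) (hc2 : ∀ p ∈ b, c < p.1) :
    ∀ t ∈ pvTrips a b, c < t.1 := by
  intro t ht
  have := (mem_keys_pvTrips a b t.1).mp (List.mem_map.mpr ⟨t, ht, rfl⟩)
  rcases this with hm | hm <;> obtain ⟨p, hp, hpe⟩ := List.mem_map.mp hm
  · exact hpe ▸ hc1 p hp
  · exact hpe ▸ hc2 p hp

theorem pairwise_keys_pvTrips (a b : List (String × List (String × String))) :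
    a.Pairwise (fun p q => p.1 < q.1) → b.Pairwise (fun p q => p.1 < q.1) →
    (pvTrips a b).Pairwise (fun t u => t.1 < u.1) := by
  induction a, b using pvTrips.induct with
  | case1 => intro _ _; rw [pvTrips]; exact List.Pairwise.nil
  | case2 k v as ih =>
    intro ha hb
    rw [pvTrips, List.pairwise_cons]
    rw [List.pairwise_cons] at ha
    exact ⟨lt_keys_pvTrips as [] k ha.1 (by simp), ih ha.2 hb⟩
  | case3 k w bs ih =>
    intro ha hb
    rw [pvTrips, List.pairwise_cons]
    rw [List.pairwise_cons] at hb
    exact ⟨lt_keys_pvTrips [] bs k (by simp) hb.1, ih ha hb.2⟩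
  | case4 k1 v as k2 w bs h ih =>
    intro ha hb
    rw [List.pairwise_cons] at ha hb
    rw [pvTrips, if_pos h, List.pairwise_cons]
    refine ⟨lt_keys_pvTrips _ _ k1 ha.1 ?_, ih ha.2 (List.pairwise_cons.mpr hb)⟩
    intro p hp
    rcases List.mem_cons.mp hp with rfl | hp
    · exact h
    · exact lt_trans h (hb.1 p hp)
  | case5 k1 v as k2 w bs h1 h2 ih =>
    intro ha hb
    rw [List.pairwise_cons] at ha hb
    rw [pvTrips, if_neg h1, if_pos h2, List.pairwise_cons]
    refine ⟨lt_keys_pvTrips _ _ k2 ?_ hb.1, ih (List.pairwise_cons.mpr ha) hb.2⟩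
    intro p hp
    rcases List.mem_cons.mp hp with rfl | hp
    · exact h2
    · exact lt_trans h2 (ha.1 p hp)
  | case6 k1 v as k2 w bs h1 h2 ih =>
    intro ha hb
    have hk : k1 = k2 := le_antisymm (not_lt.mp h2) (not_lt.mp h1)
    subst hk
    rw [List.pairwise_cons] at ha hb
    rw [pvTrips, if_neg h1, if_neg h2, List.pairwise_cons]
    exact ⟨lt_keys_pvTrips _ _ k1 ha.1 hb.1, ih ha.2 hb.2⟩


theorem lookup_pvTrips (a b : List (String × List (String × String))) :
    a.Pairwise (fun p q => p.1 < q.1) → b.Pairwise (fun p q => p.1 < q.1) →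
    ∀ t ∈ pvTrips a b, t.2.1 = List.lookup t.1 a ∧ t.2.2 = List.lookup t.1 b := by
  induction a, b using pvTrips.induct with
  | case1 => intro _ _ t ht; rw [pvTrips] at ht; simp at ht
  | case2 k v as ih =>
    intro ha hb t ht
    rw [List.pairwise_cons] at ha
    rw [pvTrips] at ht
    rcases List.mem_cons.mp ht with rfl | ht
    · exact ⟨(lookup_cons_self k v as).symm, rfl⟩
    · have hlt := lt_keys_pvTrips as [] k ha.1 (by simp) t ht
      have := ih ha.2 hb t ht
      rw [lookup_cons_ne t.1 k v as (ne_of_gt hlt)]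
      exact this
  | case3 k w bs ih =>
    intro ha hb t ht
    rw [List.pairwise_cons] at hb
    rw [pvTrips] at ht
    rcases List.mem_cons.mp ht with rfl | ht
    · exact ⟨rfl, (lookup_cons_self k w bs).symm⟩
    · have hlt := lt_keys_pvTrips [] bs k (by simp) hb.1 t ht
      have := ih ha hb.2 t ht
      rw [lookup_cons_ne t.1 k w bs (ne_of_gt hlt)]
      exact this
  | case4 k1 v as k2 w bs h ih =>
    intro ha hb t ht
    rw [List.pairwise_cons] at ha hb
    rw [pvTrips, if_pos h] at ht
    rcases List.mem_cons.mp ht with rfl | ht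
    · refine ⟨(lookup_cons_self k1 v as).symm, ?_⟩
      rw [lookup_cons_ne k1 k2 w bs (ne_of_lt h)]
      refine (lookup_eq_none_of_not_mem k1 bs ?_).symm
      intro hm
      obtain ⟨p, hp, hpe⟩ := List.mem_map.mp hm
      exact absurd (hpe ▸ hb.1 p hp) (not_lt.mpr (le_of_lt h))
    · have hlt := lt_keys_pvTrips as ((k2, w) :: bs) k1 ha.1
        (fun p hp => by
          rcases List.mem_cons.mp hp with rfl | hp
          · exact h
          · exact lt_trans h (hb.1 p hp)) t ht
      have := ih ha.2 (List.pairwise_cons.mpr hb) t ht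
      rw [lookup_cons_ne t.1 k1 v as (ne_of_gt hlt)]
      exact this
  | case5 k1 v as k2 w bs h1 h2 ih =>
    intro ha hb t ht
    rw [List.pairwise_cons] at ha hb
    rw [pvTrips, if_neg h1, if_pos h2] at ht
    rcases List.mem_cons.mp ht with rfl | ht
    · refine ⟨?_, (lookup_cons_self k2 w bs).symm⟩
      rw [lookup_cons_ne k2 k1 v as (ne_of_lt h2)]
      refine (lookup_eq_none_of_not_mem k2 as ?_).symm
      intro hm
      obtain ⟨p, hp, hpe⟩ := List.mem_map.mp hm
      exact absurd (hpe ▸ ha.1 p hp) (not_lt.mpr (le_of_lt h2))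
    · have hlt := lt_keys_pvTrips ((k1, v) :: as) bs k2
        (fun p hp => by
          rcases List.mem_cons.mp hp with rfl | hp
          · exact h2
          · exact lt_trans h2 (ha.1 p hp)) hb.1 t ht
      have := ih (List.pairwise_cons.mpr ha) hb.2 t ht
      rw [lookup_cons_ne t.1 k2 w bs (ne_of_gt hlt)]
      exact this
  | case6 k1 v as k2 w bs h1 h2 ih =>
    intro ha hb t ht
    have hk : k1 = k2 := le_antisymm (not_lt.mp h2) (not_lt.mp h1)
    subst hk
    rw [List.pairwise_cons] at ha hb
    rw [pvTrips, if_neg h1, if_neg h2] at ht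
    rcases List.mem_cons.mp ht with rfl | ht
    · exact ⟨(lookup_cons_self k1 v as).symm, (lookup_cons_self k1 w bs).symm⟩
    · have hlt := lt_keys_pvTrips as bs k1 ha.1 hb.1 t ht
      have := ih ha.2 hb.2 t ht
      rw [lookup_cons_ne t.1 k1 v as (ne_of_gt hlt), lookup_cons_ne t.1 k1 w bs (ne_of_gt hlt)]
      exact this


-- two strictly key-sorted lists whose entries are functions of their keys and whose key sets
-- agree are equal
theorem eq_of_sorted_key_determined {α : Type} (key : α → String) (f : String → α) :
    ∀ (l1 l2 : List α),
      l1.Pairwise (fun x y => key x < key y) → l2.Pairwise (fun x y => key x < key y) →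
      (∀ x ∈ l1, x = f (key x)) → (∀ x ∈ l2, x = f (key x)) →
      (∀ k, k ∈ l1.map key ↔ k ∈ l2.map key) → l1 = l2 := by
  intro l1
  induction l1 with
  | nil =>
    intro l2 _ _ _ _ hmem
    cases l2 with
    | nil => rfl
    | cons y t2 => exact absurd ((hmem (key y)).mpr (by simp)) (by simp)
  | cons x t1 ih =>
    intro l2 h1 h2 hf1 hf2 hmem
    cases l2 with
    | nil => exact absurd ((hmem (key x)).mp (by simp)) (by simp)
    | cons y t2 =>
      rw [List.pairwise_cons] at h1 h2
      have hxy : key x = key y := by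
        have hx2 : key x ∈ (y :: t2).map key := (hmem (key x)).mp (by simp)
        have hy1 : key y ∈ (x :: t1).map key := (hmem (key y)).mpr (by simp)
        have hle1 : key y ≤ key x := by
          rcases List.mem_cons.mp hx2 with he | hm
          · exact le_of_eq he.symm
          · obtain ⟨p, hp, hpe⟩ := List.mem_map.mp hm
            exact le_of_lt (hpe ▸ h2.1 p hp)
        have hle2 : key x ≤ key y := by
          rcases List.mem_cons.mp hy1 with he | hm
          · exact le_of_eq he.symm
          · obtain ⟨p, hp, hpe⟩ := List.mem_map.mp hm
            exact le_of_lt (hpe ▸ h1.1 p hp)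
        exact le_antisymm hle2 hle1
      have hxey : x = y := by
        rw [hf1 x (by simp), hf2 y (by simp), hxy]
      rw [hxey]
      congr 1
      refine ih t2 h1.2 h2.2 (fun z hz => hf1 z (List.mem_cons_of_mem _ hz))
        (fun z hz => hf2 z (List.mem_cons_of_mem _ hz)) ?_
      intro k
      constructor
      · intro hk
        have hlt : key x < k := by
          obtain ⟨p, hp, hpe⟩ := List.mem_map.mp hk
          exact hpe ▸ h1.1 p hp
        have : k ∈ (y :: t2).map key := (hmem k).mp (List.mem_cons_of_mem _ hk)
        rcases List.mem_cons.mp this with he | hm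
        · exact absurd (he.trans hxy.symm) (ne_of_gt hlt)
        · exact hm
      · intro hk
        have hlt : key y < k := by
          obtain ⟨p, hp, hpe⟩ := List.mem_map.mp hk
          exact hpe ▸ h2.1 p hp
        have : k ∈ (x :: t1).map key := (hmem k).mpr (List.mem_cons_of_mem _ hk)
        rcases List.mem_cons.mp this with he | hm
        · exact absurd (he.trans hxy) (ne_of_gt hlt)
        · exact hm

-- ===== VERDICT (by name: the statement is the Claim_ definition above) =====
theorem derive_dirty_scopes_py_spec : Claim_equal_derive_dirty_scopes_py := by
  intro previous current _ hpre
  obtain ⟨hnd1, hnd2⟩ := hpre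
  unfold Spec_derive_dirty_scopes_py
  simp only [derive_dirty_scopes_py, derive_dirty_scopes_py_alt]
  rw [PySem.List.foldl_append_if_eq_filter, List.nil_append, foldl_scopes_A, pvMerge_eq_foldl,
    foldl_pvBody]
  set prev := previous.getD [] with hprevdef
  set sA := PySem.List.sorted prev (fun kv => kv.1) false with hsA
  set sB := PySem.List.sorted current (fun kv => kv.1) false with hsB
  set U := PySem.Set.union (PySem.Set.ofList (current.map (·.1))) (prev.map (·.1)) with hU
  set ap := PySem.List.sorted U (fun x => x) false with hap
  have hpa : sA.Perm prev := PySem.List.sorted_perm _ _ _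
  have hpb : sB.Perm current := PySem.List.sorted_perm _ _ _
  have hndA : (sA.map Prod.fst).Nodup := ((hpa.map Prod.fst).nodup_iff).mpr hnd1
  have hndB : (sB.map Prod.fst).Nodup := ((hpb.map Prod.fst).nodup_iff).mpr hnd2
  have hltA : sA.Pairwise (fun p q => p.1 < q.1) := by
    have h1 := PySem.List.sorted_pairwise prev (fun kv => kv.1)
    have h2 : sA.Pairwise (fun p q => p.1 ≠ q.1) := List.pairwise_map.mp hndA
    exact (h1.and h2).imp fun h => lt_of_le_of_ne h.1 h.2
  have hltB : sB.Pairwise (fun p q => p.1 < q.1) := by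
    have h1 := PySem.List.sorted_pairwise current (fun kv => kv.1)
    have h2 : sB.Pairwise (fun p q => p.1 ≠ q.1) := List.pairwise_map.mp hndB
    exact (h1.and h2).imp fun h => lt_of_le_of_ne h.1 h.2
  have hpap : ap.Perm U := PySem.List.sorted_perm _ _ _
  have hndU : U.Nodup := PySem.Set.nodup_union _ _ (PySem.Set.nodup_ofList _)
  have hndap : ap.Nodup := (hpap.nodup_iff).mpr hndU
  have hltap : ap.Pairwise (· < ·) := by
    have h1 := PySem.List.sorted_pairwise U (fun x => x)
    exact (h1.and hndap).imp fun h => lt_of_le_of_ne h.1 h.2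
  have htrips : pvTrips sA sB =
      ap.map (fun k => (k, List.lookup k prev, List.lookup k current)) := by
    apply eq_of_sorted_key_determined (fun t => t.1)
      (fun k => (k, List.lookup k prev, List.lookup k current))
    · exact pairwise_keys_pvTrips _ _ hltA hltB
    · exact List.pairwise_map.mpr hltap
    · intro t ht
      obtain ⟨h1, h2⟩ := lookup_pvTrips sA sB hltA hltB t ht
      have e1 : List.lookup t.1 sA = List.lookup t.1 prev := lookup_of_perm _ _ _ hpa hndA
      have e2 : List.lookup t.1 sB = List.lookup t.1 current := lookup_of_perm _ _ _ hpb hndB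
      show t = (t.1, List.lookup t.1 prev, List.lookup t.1 current)
      rw [← e1, ← e2, ← h1, ← h2]
    · intro x hx
      obtain ⟨k, hk, rfl⟩ := List.mem_map.mp hx
      rfl
    · intro k
      rw [mem_keys_pvTrips]
      have hid : (ap.map (fun k => (k, List.lookup k prev, List.lookup k current))).map
          (fun t => t.1) = ap := by
        rw [List.map_map]
        exact List.map_id ap
      rw [hid]
      have hmap : k ∈ ap ↔ k ∈ current.map (·.1) ∨ k ∈ prev.map (·.1) := by
        rw [hap, PySem.List.mem_sorted, hU, PySem.Set.mem_union, PySem.Set.mem_ofList]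
      rw [hmap, (hpa.map Prod.fst).mem_iff, (hpb.map Prod.fst).mem_iff]
      exact or_comm
  rw [htrips]
  have hcomp : (pvTChanged ∘ (fun k => (k, List.lookup k prev, List.lookup k current)))
      = (fun rel => !(pvOptRowEq (List.lookup rel prev) (List.lookup rel current))) := by
    funext k
    rfl
  rw [List.filter_map, hcomp]
  have hts : (fun a => pvTScopes (a, List.lookup a prev, List.lookup a current))
      = pvScopeList prev current := by
    funext k
    unfold pvTScopes pvScopeList pvPluginListO
    cases h1 : List.lookup k prev <;> cases h2 : List.lookup k current <;>
      simp [pvPluginList]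
  rw [List.flatMap_map, hts]
  simp [PySem.List.len_eq]
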